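-- pv_equiv track=rewrite | github.com/Kenan3477/FroniterAi | modules/self-improvement/error_detection.py | _find_common_values
-- ===== SOURCE A (Python) =====
-- from typing import Dict, List, Any, Optional, Tuple, Set
--
-- def _find_common_values(contexts: List[Dict], key: str) -> List[str]:
--     """Find common values for a key across contexts"""
--
--     values = [ctx.get(key) for ctx in contexts if ctx.get(key)]
--
--     if not values:
--         return []
--
--     # Count occurrences
--     value_counts = {}
--     for value in values:
--         value_counts[value] = value_counts.get(value, 0) + 1
--
--     # Return sorted by frequency
--     return sorted(value_counts.keys(), key=lambda x: value_counts[x], reverse=True)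
-- ===== SOURCE B (Python) =====
-- def _find_common_values(contexts, key):
--     """Find common values for a key across contexts"""
--
--     values = [v for v in (ctx.get(key) for ctx in contexts) if v]
--
--     if not values:
--         return []
--
--     # Distinct values in first-appearance order, each with its frequency
--     distinct = list(dict.fromkeys(values))
--     counts = [(v, values.count(v)) for v in distinct]
--
--     # Sweep frequencies from the highest down to 1, emitting each
--     # frequency's values in first-appearance order (no comparison sort)
--     c = max(cnt for _, cnt in counts)
--     result = []
--     while c > 0:
--         result.extend(v for v, cnt in counts if cnt == c)
--         c -= 1
--     return result
-- ===== Notes on version B (the rewrite author's own statement) =====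
-- stated objective: alternative
-- what changed: Replaces the comparison sort by frequency (sorted with key=count, reverse=True) with a counting/pigeonhole sweep: build (value, frequency) pairs in first-appearance order, then scan frequencies from max(count) down to 1 emitting each frequency's values, which reproduces the stable reverse sort without sorting.
import Mathlib
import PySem

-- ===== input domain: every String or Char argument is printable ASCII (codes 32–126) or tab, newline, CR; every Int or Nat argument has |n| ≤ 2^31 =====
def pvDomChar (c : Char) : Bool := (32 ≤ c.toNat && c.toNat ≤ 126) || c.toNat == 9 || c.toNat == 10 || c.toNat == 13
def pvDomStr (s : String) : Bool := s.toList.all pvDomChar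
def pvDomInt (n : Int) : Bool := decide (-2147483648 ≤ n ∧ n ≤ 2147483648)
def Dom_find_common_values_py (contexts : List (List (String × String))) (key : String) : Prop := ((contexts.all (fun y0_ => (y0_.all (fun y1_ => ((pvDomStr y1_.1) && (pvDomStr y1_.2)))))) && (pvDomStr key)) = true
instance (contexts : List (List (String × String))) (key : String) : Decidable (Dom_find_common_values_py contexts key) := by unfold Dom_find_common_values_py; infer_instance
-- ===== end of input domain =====

-- B replaces A's comparison sort by frequency with a counting sweep from the maximal
-- frequency down to 1 (objective: alternative algorithm, no sort); same return value.

-- ===== PORT A =====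
-- Literal port of A. dict.get = first-match lookup in the association list (List.lookup);
-- a string is truthy iff non-empty; value_counts[x] in the sort key is value_counts.getD x 0,
-- exact because x is always a key of value_counts.
def find_common_values_py (contexts : List (List (String × String))) (key : String) : List String :=
  let values := contexts.filterMap (fun ctx =>
    match List.lookup key ctx with
    | some v => if v ≠ "" then some v else none
    | none => none)
  if values = [] then []
  else
    let value_counts : PySem.Dict String Int :=
      values.foldl (fun d v => d.insert v (d.getD v 0 + 1)) PySem.Dict.empty
    PySem.List.sorted value_counts.keys (fun x => value_counts.getD x 0) true

-- ===== PORT B =====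
-- The while loop of Source B: c counts down from max_count to 1; fuel n encodes the current c = n.
def pvCollect (counts : List (String × Int)) : Nat → List String
  | 0 => []
  | n + 1 => (counts.filter (fun p => p.2 == ((n : Int) + 1))).map (fun p => p.1) ++ pvCollect counts n

-- Literal port of B (Source B): distinct values via dict.fromkeys = PySem.List.dedup, counts via
-- list.count, then the descending frequency sweep. max over the nonempty counts list is
-- (max? …).getD 0 (the default is never used); c.toNat is exact since c ≥ 1 there.
def find_common_values_py_alt (contexts : List (List (String × String))) (key : String) : List String :=
  let values := contexts.filterMap (fun ctx =>
    match List.lookup key ctx with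
    | some v => if v ≠ "" then some v else none
    | none => none)
  if values = [] then []
  else
    let distinct := PySem.List.dedup values
    let counts := distinct.map (fun v => (v, (PySem.List.count values v : Int)))
    let c := (PySem.List.max? (counts.map (fun p => p.2)) (fun x => x)).getD 0
    pvCollect counts c.toNat

-- ===== PRECONDITION & SPEC =====
def Spec_find_common_values_py (contexts : List (List (String × String))) (key : String) (out : List String) : Prop := out = find_common_values_py_alt contexts key
instance (contexts : List (List (String × String))) (key : String) (out : List String) : Decidable (Spec_find_common_values_py contexts key out) := by unfold Spec_find_common_values_py; infer_instance

-- ===== CLAIM (what is proved, stated in full; the proofs are below) =====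
def Claim_equal_find_common_values_py : Prop := ∀ (contexts : List (List (String × String))) (key : String), Dom_find_common_values_py contexts key → Spec_find_common_values_py contexts key (find_common_values_py contexts key)

-- ===== LEMMAS AND PROOFS =====

-- buckets of a generic list under a frequency function, from level M down to 1
def pvBuckets {α : Type} (f : α → Int) (ks : List α) : Nat → List α
  | 0 => []
  | n + 1 => ks.filter (fun k => f k == ((n : Int) + 1)) ++ pvBuckets f ks n

theorem insertBy_cons {α : Type} (bf : α → α → Bool) (x y : α) (ys : List α) :
    PySem.List.insertBy bf x (y :: ys) = if bf x y then x :: y :: ys else y :: PySem.List.insertBy bf x ys := rfl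

theorem insertBy_skip {α : Type} (bf : α → α → Bool) (x : α) (as bs : List α)
    (h : ∀ a ∈ as, bf x a = false) :
    PySem.List.insertBy bf x (as ++ bs) = as ++ PySem.List.insertBy bf x bs := by
  induction as with
  | nil => simp
  | cons a t ih =>
    have ha : bf x a = false := h a (by simp)
    simp only [List.cons_append, insertBy_cons, ha, if_false, Bool.false_eq_true]
    rw [ih (fun a ha' => h a (by simp [ha']))]

theorem insertBy_all_before {α : Type} (bf : α → α → Bool) (x : α) (l : List α)
    (h : ∀ a ∈ l, bf x a = true) :
    PySem.List.insertBy bf x l = x :: l := by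
  cases l with
  | nil => rfl
  | cons y ys => rw [insertBy_cons, if_pos (h y (by simp))]

theorem mem_pvBuckets {α : Type} (f : α → Int) (ks : List α) (M : Nat) (y : α)
    (hy : y ∈ pvBuckets f ks M) : y ∈ ks ∧ f y ≤ (M : Int) := by
  induction M with
  | zero => simp [pvBuckets] at hy
  | succ n ih =>
    simp only [pvBuckets, List.mem_append] at hy
    rcases hy with h | h
    · rcases List.mem_filter.1 h with ⟨hm, he⟩
      refine ⟨hm, ?_⟩
      have : f y = (n : Int) + 1 := by simpa using he
      omega
    · rcases ih h with ⟨hm, hb⟩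
      exact ⟨hm, by push_cast; omega⟩

theorem pvBuckets_snoc_gt {α : Type} (f : α → Int) (ks : List α) (x : α) (M : Nat)
    (h : (M : Int) < f x) : pvBuckets f (ks ++ [x]) M = pvBuckets f ks M := by
  induction M with
  | zero => rfl
  | succ n ih =>
    have hx : (f x == ((n : Int) + 1)) = false := by
      simp only [beq_eq_false_iff_ne]
      push_cast at h
      omega
    have ih' := ih (by push_cast at h ⊢; omega)
    simp [pvBuckets, List.filter_append, hx, ih']

theorem pvBuckets_insert_step {α : Type} (f : α → Int) (ks : List α) (x : α) (M : Nat)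
    (h1 : 1 ≤ f x) (h2 : f x ≤ (M : Int)) :
    PySem.List.insertBy (fun a b => decide (f b < f a)) x (pvBuckets f ks M)
      = pvBuckets f (ks ++ [x]) M := by
  induction M with
  | zero => omega
  | succ n ih =>
    by_cases hx : f x = (n : Int) + 1
    · -- x belongs to the top bucket
      have hskip : ∀ a ∈ ks.filter (fun k => f k == ((n : Int) + 1)), (decide (f a < f x)) = false := by
        intro a ha
        have : f a = (n : Int) + 1 := by simpa using (List.mem_filter.1 ha).2
        simp [this, hx]
      have hall : ∀ a ∈ pvBuckets f ks n, (decide (f a < f x)) = true := by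
        intro a ha
        have := (mem_pvBuckets f ks n a ha).2
        simp only [decide_eq_true_eq]
        omega
      rw [pvBuckets, insertBy_skip _ _ _ _ hskip, insertBy_all_before _ _ _ hall]
      have hlow : pvBuckets f (ks ++ [x]) n = pvBuckets f ks n :=
        pvBuckets_snoc_gt f ks x n (by omega)
      simp [pvBuckets, List.filter_append, hx, hlow]
    · -- x goes below the top bucket
      have hfx : f x ≤ (n : Int) := by push_cast at h2; omega
      have hskip : ∀ a ∈ ks.filter (fun k => f k == ((n : Int) + 1)), (decide (f a < f x)) = false := by
        intro a ha
        have : f a = (n : Int) + 1 := by simpa using (List.mem_filter.1 ha).2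
        simp only [decide_eq_false_iff_not, not_lt, this]
        omega
      have hxne : (f x == ((n : Int) + 1)) = false := by simpa using hx
      rw [pvBuckets, insertBy_skip _ _ _ _ hskip, ih hfx]
      simp [pvBuckets, List.filter_append, hxne]

theorem sorted_eq_pvBuckets {α : Type} (f : α → Int) (ks : List α) (M : Nat)
    (h : ∀ k ∈ ks, 1 ≤ f k ∧ f k ≤ (M : Int)) :
    PySem.List.sorted ks f true = pvBuckets f ks M := by
  rw [PySem.List.sorted_rev_eq_foldl_insertBy]
  induction ks using List.reverseRecOn with
  | nil =>
    induction M with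
    | zero => rfl
    | succ n ih => simp [pvBuckets, ih]
  | append_singleton ks x ih =>
    rw [List.foldl_append, List.foldl_cons, List.foldl_nil,
      ih (fun k hk => h k (by simp [hk]))]
    exact pvBuckets_insert_step f ks x M (h x (by simp)).1 (h x (by simp)).2

theorem pv_max_some {α κ : Type} [LinearOrder κ] (xs : List α) (key : α → κ) (hx : xs ≠ []) :
    ∃ m, PySem.List.max? xs key = some m := by
  cases xs with
  | nil => exact absurd rfl hx
  | cons a t =>
    simp only [PySem.List.max?, List.foldl_cons]
    clear hx
    induction t generalizing a with
    | nil => exact ⟨a, rfl⟩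
    | cons b t ih =>
      simp only [List.foldl_cons]
      split <;> exact ih _

theorem pv_getD_mapped (l : List String) (g : String → Int) (v : String) (hv : v ∈ l) :
    (PySem.Dict.mk (l.map (fun u => (u, g u)))).getD v 0 = g v := by
  induction l with
  | nil => simp at hv
  | cons a t ih =>
    by_cases hav : a = v
    · subst hav
      simp [PySem.Dict.getD, PySem.Dict.get?_mk_cons]
    · have hv' : v ∈ t := List.mem_of_ne_of_mem (fun h => hav h.symm) hv
      have : (a == v) = false := by simpa using hav
      simpa [PySem.Dict.getD, PySem.Dict.get?_mk_cons, this] using ih hv'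

theorem pv_getD_mapped_not_mem (l : List String) (g : String → Int) (v : String) (hv : v ∉ l) :
    (PySem.Dict.mk (l.map (fun u => (u, g u)))).getD v 0 = 0 := by
  induction l with
  | nil => simp [PySem.Dict.getD, PySem.Dict.get?]
  | cons a t ih =>
    have hav : (a == v) = false := by simpa using fun h => hv (by simp [h])
    simpa [PySem.Dict.getD, PySem.Dict.get?_mk_cons, hav] using ih (fun h => hv (by simp [h]))

theorem pv_dedup_snoc (pre : List String) (x : String) :
    PySem.List.dedup (pre ++ [x]) =
      if x ∈ pre then PySem.List.dedup pre else PySem.List.dedup pre ++ [x] := by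
  show PySem.Set.ofList (pre ++ [x]) = _
  rw [PySem.Set.ofList, List.foldl_append, List.foldl_cons, List.foldl_nil]
  show PySem.Set.add (PySem.Set.ofList pre) x = _
  rw [PySem.Set.add]
  by_cases hx : x ∈ pre
  · rw [if_pos hx, if_pos]
    · rfl
    · exact List.elem_eq_true_of_mem ((PySem.Set.mem_ofList pre x).2 hx)
  · rw [if_neg hx, if_neg]
    · rfl
    · intro h
      exact hx ((PySem.Set.mem_ofList pre x).1 (List.mem_of_elem_eq_true h))

theorem pv_counts_loop (xs : List String) : ∀ (pre : List String),
    (xs.foldl (fun d v => d.insert v (d.getD v 0 + 1))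
        (PySem.Dict.mk ((PySem.List.dedup pre).map (fun v => (v, (List.count v pre : Int)))))).items
      = (PySem.List.dedup (pre ++ xs)).map (fun v => (v, (List.count v (pre ++ xs) : Int))) := by
  induction xs with
  | nil => intro pre; simp
  | cons x t ih =>
    intro pre
    rw [List.foldl_cons]
    have hstep : (PySem.Dict.mk ((PySem.List.dedup pre).map (fun v => (v, (List.count v pre : Int))))).insert x
          ((PySem.Dict.mk ((PySem.List.dedup pre).map (fun v => (v, (List.count v pre : Int))))).getD x 0 + 1)
        = PySem.Dict.mk ((PySem.List.dedup (pre ++ [x])).map (fun v => (v, (List.count v (pre ++ [x]) : Int)))) := by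
      by_cases hx : x ∈ pre
      · have hxd : x ∈ PySem.List.dedup pre := (PySem.Set.mem_ofList pre x).2 hx
        have hgd : (PySem.Dict.mk ((PySem.List.dedup pre).map (fun v => (v, (List.count v pre : Int))))).getD x 0
            = (List.count x pre : Int) := pv_getD_mapped _ _ _ hxd
        have hcont : (PySem.Dict.mk ((PySem.List.dedup pre).map (fun v => (v, (List.count v pre : Int))))).contains x = true := by
          simp only [PySem.Dict.contains, List.any_map, List.any_eq_true]
          exact ⟨x, hxd, by simp⟩
        rw [hgd, PySem.Dict.insert, if_pos hcont, pv_dedup_snoc, if_pos hx]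
        congr 1
        simp only [List.map_map]
        apply List.map_congr_left
        intro u _
        by_cases hux : u = x
        · subst hux; simp [List.count_append]
        · have : (u == x) = false := by simpa using hux
          simp [Function.comp, this, List.count_append,
            (show ¬ x = u from fun h => hux h.symm)]
      · have hxd : x ∉ PySem.List.dedup pre := fun h => hx ((PySem.Set.mem_ofList pre x).1 h)
        have hgd : (PySem.Dict.mk ((PySem.List.dedup pre).map (fun v => (v, (List.count v pre : Int))))).getD x 0 = 0 :=
          pv_getD_mapped_not_mem _ _ _ hxd
        have hcont : (PySem.Dict.mk ((PySem.List.dedup pre).map (fun v => (v, (List.count v pre : Int))))).contains x = false := by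
          simp only [PySem.Dict.contains, List.any_map, List.any_eq_false]
          intro u hu
          simp only [Function.comp, beq_eq_false_iff_ne]
          exact fun h => hxd (eq_of_beq h ▸ hu)
        have hcont' : ¬ ((PySem.Dict.mk ((PySem.List.dedup pre).map (fun v => (v, (List.count v pre : Int))))).contains x = true) := by
          intro hc; rw [hc] at hcont; exact Bool.noConfusion hcont
        rw [hgd, PySem.Dict.insert, if_neg hcont', pv_dedup_snoc, if_neg hx]
        congr 1
        simp only [List.map_append]
        congr 1
        · apply List.map_congr_left
          intro u hu
          have hux : u ≠ x := fun h => hxd (h ▸ hu)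
          simp [List.count_append,
            (show ¬ x = u from fun h => hux h.symm)]
        · have h0 : List.count x pre = 0 := List.count_eq_zero.2 hx
          simp [List.count_append, h0]
    rw [hstep]
    have := ih (pre ++ [x])
    simpa using this

theorem pv_counts_items (xs : List String) :
    (xs.foldl (fun d v => d.insert v (d.getD v 0 + 1)) PySem.Dict.empty).items
      = (PySem.List.dedup xs).map (fun v => (v, (List.count v xs : Int))) := by
  simpa using pv_counts_loop xs []

theorem pvBuckets_eq_collect (l : List String) (c : String → Int) (g : String → Int)
    (hg : ∀ v ∈ l, g v = c v) (M : Nat) :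
    pvBuckets g l M = pvCollect (l.map (fun v => (v, c v))) M := by
  induction M with
  | zero => rfl
  | succ n ih =>
    rw [pvBuckets, pvCollect, ih]
    congr 1
    rw [List.filter_map]
    have h1 : (l.filter ((fun p => p.2 == ((n : Int) + 1)) ∘ (fun v => (v, c v))))
        = l.filter (fun v => g v == ((n : Int) + 1)) :=
      List.filter_congr (fun v hv => by simp [Function.comp, hg v hv])
    rw [h1, List.map_map]
    simp [Function.comp_def]

-- ===== VERDICT (by name: the statement is the Claim_ definition above) =====
theorem find_common_values_py_spec : Claim_equal_find_common_values_py := by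
  intro contexts key _
  unfold Spec_find_common_values_py
  simp only [find_common_values_py, find_common_values_py_alt]
  set values := contexts.filterMap (fun ctx =>
    match List.lookup key ctx with
    | some v => if v ≠ "" then some v else none
    | none => none) with hvdef
  by_cases hvals : values = []
  · rw [if_pos hvals, if_pos hvals]
  · simp only [if_neg hvals]
    set l := PySem.List.dedup values with hl
    set c : String → Int := fun v => (List.count v values : Int) with hc
    have hcounts : (l.map (fun v => (v, (PySem.List.count values v : Int))))
        = l.map (fun v => (v, c v)) := by simp [PySem.List.count, hc]
    rw [hcounts]
    -- the dict built by A's loop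
    have hd : (values.foldl (fun d v => d.insert v (d.getD v 0 + 1)) PySem.Dict.empty)
        = PySem.Dict.mk (l.map (fun v => (v, c v))) := by
      apply PySem.Dict.ext
      exact pv_counts_items values
    rw [hd]
    -- keys of that dict
    have hkeys : (PySem.Dict.mk (l.map (fun v => (v, c v)))).keys = l := by
      simp [PySem.Dict.keys, Function.comp_def]
    rw [hkeys]
    -- the maximum
    have hlne : l ≠ [] := by
      cases hv : values with
      | nil => exact absurd hv hvals
      | cons a t =>
        have : a ∈ l := (PySem.Set.mem_ofList values a).2 (by rw [hv]; simp)
        exact List.ne_nil_of_mem this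
    have hmapne : (l.map (fun v => (v, c v))).map (fun p => p.2) ≠ [] := by
      simp [hlne]
    obtain ⟨m, hm⟩ := pv_max_some ((l.map (fun v => (v, c v))).map (fun p => p.2)) (fun x => x) hmapne
    rw [hm]
    have hub : ∀ y ∈ (l.map (fun v => (v, c v))).map (fun p => p.2), y ≤ m :=
      fun y hy => PySem.List.max?_isMax hm y hy
    have hcv : ∀ v ∈ l, 1 ≤ c v ∧ c v ≤ m := by
      intro v hv
      constructor
      · have : v ∈ values := (PySem.Set.mem_ofList values v).1 hv
        have := List.count_pos_iff.2 this
        simp only [hc]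
        omega
      · exact hub (c v) (by simp; exact ⟨v, hv, rfl⟩)
    have h1m : 1 ≤ m := by
      cases hlc : l with
      | nil => exact absurd hlc hlne
      | cons a t =>
        have ha : a ∈ l := by rw [hlc]; simp
        have := hcv a ha
        omega
    have hmt : ((Option.getD (some m) 0).toNat : Int) = m := by
      simp only [Option.getD_some]
      omega
    -- the sort key agrees with c on l
    have hg : ∀ v ∈ l, (PySem.Dict.mk (l.map (fun v => (v, c v)))).getD v 0 = c v :=
      fun v hv => pv_getD_mapped l c v hv
    have hbound : ∀ k ∈ l, 1 ≤ (PySem.Dict.mk (l.map (fun v => (v, c v)))).getD k 0 ∧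
        (PySem.Dict.mk (l.map (fun v => (v, c v)))).getD k 0 ≤ (((Option.getD (some m) 0).toNat : Nat) : Int) := by
      intro k hk
      rw [hg k hk, hmt]
      exact hcv k hk
    rw [sorted_eq_pvBuckets (fun x => (PySem.Dict.mk (l.map (fun v => (v, c v)))).getD x 0) l
        (Option.getD (some m) 0).toNat hbound]
    exact pvBuckets_eq_collect l c _ hg _
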